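-- pv_equiv track=rewrite | github.com/the-puzzler/Microbiome-Modelling | scripts/snowmelt/utils.py | parse_isolate_field
-- ===== SOURCE A (Python) =====
-- def parse_isolate_field(val: str):
--     """
--     Parse isolate strings like 'Fungi_Block7_IceEncasement_Csampling'.
--     Returns (block:int|None, treatment:str|None, time:str|None) where
--     treatment in {'IE','AMB','NoICE','NoSNOW','COMP'} and time in {'A','B','C'}.
--     """
--     parts = [p for p in (val or '').strip().split('_') if p]
--     block = None
--     treatment = None
--     time = None
--     for p in parts:
--         lp = p.lower()
--         if lp.startswith('block'):
--             try:
--                 block = int(''.join(ch for ch in p if ch.isdigit()))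
--             except Exception:
--                 block = None
--         elif lp.endswith('sampling') and len(p) >= 1:
--             time = p[0].upper()  # A/B/C
--         elif lp in (
--             'iceencasement',
--             'ambient',
--             'noice',
--             'nosnow',
--             'compactedsnow',
--         ):
--             treatment = {
--                 'iceencasement': 'IE',
--                 'ambient': 'AMB',
--                 'noice': 'NoICE',
--                 'nosnow': 'NoSNOW',
--                 'compactedsnow': 'COMP',
--             }[lp]
--     return block, treatment, time
-- ===== SOURCE B (Python) =====
-- _TREATMENT = {
--     'iceencasement': 'IE',
--     'ambient': 'AMB',
--     'noice': 'NoICE',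
--     'nosnow': 'NoSNOW',
--     'compactedsnow': 'COMP',
-- }
--
--
-- def parse_isolate_field(val: str):
--     """Three independent right-to-left scans, one per field (last match wins)."""
--     parts = [p for p in (val or '').strip().split('_') if p]
--     rev = list(reversed(parts))
--
--     block = None
--     for p in rev:
--         if p.lower().startswith('block'):
--             digits = ''.join(ch for ch in p if ch.isdigit())
--             block = int(digits) if digits else None
--             break
--
--     treatment = None
--     for p in rev:
--         t = _TREATMENT.get(p.lower())
--         if t is not None:
--             treatment = t
--             break
--
--     time = None
--     for p in rev:
--         lp = p.lower()
--         # a token starting with 'block' is claimed by the block field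
--         if lp.endswith('sampling') and not lp.startswith('block'):
--             time = p[0].upper()
--             break
--
--     return block, treatment, time
-- ===== Notes on version B (the rewrite author's own statement) =====
-- stated objective: alternative
-- what changed: Replaces A's single classifying loop carrying three mutable fields with three independent right-to-left scans that each return on the first (i.e. last in original order) matching token.
import Mathlib
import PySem

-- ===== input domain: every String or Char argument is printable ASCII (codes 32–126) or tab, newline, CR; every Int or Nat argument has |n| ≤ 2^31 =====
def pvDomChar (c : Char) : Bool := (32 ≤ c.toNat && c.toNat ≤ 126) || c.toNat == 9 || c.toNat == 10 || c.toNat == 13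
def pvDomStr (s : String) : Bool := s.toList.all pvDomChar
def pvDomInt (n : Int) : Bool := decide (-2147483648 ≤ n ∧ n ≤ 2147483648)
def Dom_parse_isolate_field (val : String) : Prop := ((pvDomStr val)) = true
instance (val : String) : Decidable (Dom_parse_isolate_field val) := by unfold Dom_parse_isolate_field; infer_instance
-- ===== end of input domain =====

-- B replaces A's single classifying loop (three mutable fields) by three independent
-- right-to-left scans, one per field, each stopping at its first match (objective: alternative).

-- shared by both ports: the treatment mapping and the token preprocessing (identical in both Pythons)
def pvTreat? (lp : String) : Option String :=
  if lp = "iceencasement" then some "IE"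
  else if lp = "ambient" then some "AMB"
  else if lp = "noice" then some "NoICE"
  else if lp = "nosnow" then some "NoSNOW"
  else if lp = "compactedsnow" then some "COMP"
  else none

-- [p for p in (val or '').strip().split('_') if p]   ('_' ≠ '' so split? always returns some)
def pvParts (val : String) : List String :=
  ((PySem.Str.split? (PySem.Str.strip val) "_").getD []).filter (fun p => p != "")

-- ===== PORT A =====
def pvStepA (st : Option Int × Option String × Option String) (p : String) :
    Option Int × Option String × Option String :=
  if PySem.Str.startswith (PySem.Str.lower p) "block" then
    -- try: block = int(''.join(ch for ch in p if ch.isdigit())) except: block = None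
    (PySem.Int.ofStr? (String.ofList (p.toList.filter PySem.Chars.isdigit)), st.2.1, st.2.2)
  else if PySem.Str.endswith (PySem.Str.lower p) "sampling" && decide (1 ≤ PySem.Str.len p) then
    (st.1, st.2.1, (PySem.Str.pyGet? p 0).map fun c => String.ofList [PySem.Chars.upperChar c])
  else
    match pvTreat? (PySem.Str.lower p) with
    | some t => (st.1, some t, st.2.2)
    | none => st

def parse_isolate_field (val : String) : Option Int × Option String × Option String :=
  (pvParts val).foldl pvStepA (none, none, none)

-- ===== PORT B =====
def pvFindBlock : List String → Option Int
  | [] => none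
  | p :: rest =>
    if PySem.Str.startswith (PySem.Str.lower p) "block" then
      -- block = int(digits) if digits else None  (digits nonempty and all-digit, so int succeeds)
      if String.ofList (p.toList.filter PySem.Chars.isdigit) = "" then none
      else PySem.Int.ofStr? (String.ofList (p.toList.filter PySem.Chars.isdigit))
    else pvFindBlock rest

def pvFindTreat : List String → Option String
  | [] => none
  | p :: rest =>
    match pvTreat? (PySem.Str.lower p) with
    | some t => some t
    | none => pvFindTreat rest

def pvFindTime : List String → Option String
  | [] => none
  | p :: rest =>
    if PySem.Str.endswith (PySem.Str.lower p) "sampling" &&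
        !PySem.Str.startswith (PySem.Str.lower p) "block" then
      (PySem.Str.pyGet? p 0).map fun c => String.ofList [PySem.Chars.upperChar c]
    else pvFindTime rest

def parse_isolate_field_alt (val : String) : Option Int × Option String × Option String :=
  (pvFindBlock (pvParts val).reverse, pvFindTreat (pvParts val).reverse, pvFindTime (pvParts val).reverse)

-- ===== PRECONDITION & SPEC =====
def Spec_parse_isolate_field (val : String) (out : Option Int × Option String × Option String) : Prop := out = parse_isolate_field_alt val
instance (val : String) (out : Option Int × Option String × Option String) : Decidable (Spec_parse_isolate_field val out) := by unfold Spec_parse_isolate_field; infer_instance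

-- ===== CLAIM (what is proved, stated in full; the proofs are below) =====
def Claim_equal_parse_isolate_field : Prop := ∀ (val : String), Dom_parse_isolate_field val → Spec_parse_isolate_field val (parse_isolate_field val)

-- ===== LEMMAS AND PROOFS =====

-- "found" versions distinguishing 'no matching token' from 'matched, value none'
def pvFindB : List String → Option (Option Int)
  | [] => none
  | p :: rest =>
    if PySem.Str.startswith (PySem.Str.lower p) "block" then
      some (PySem.Int.ofStr? (String.ofList (p.toList.filter PySem.Chars.isdigit)))
    else pvFindB rest

def pvFindT : List String → Option (Option String)
  | [] => none
  | p :: rest =>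
    if !PySem.Str.startswith (PySem.Str.lower p) "block" &&
        (PySem.Str.endswith (PySem.Str.lower p) "sampling" && decide (1 ≤ PySem.Str.len p)) then
      some ((PySem.Str.pyGet? p 0).map fun c => String.ofList [PySem.Chars.upperChar c])
    else pvFindT rest

def pvFindTr : List String → Option String
  | [] => none
  | p :: rest =>
    if PySem.Str.startswith (PySem.Str.lower p) "block" ||
        (PySem.Str.endswith (PySem.Str.lower p) "sampling" && decide (1 ≤ PySem.Str.len p)) then
      pvFindTr rest
    else
      match pvTreat? (PySem.Str.lower p) with
      | some t => some t
      | none => pvFindTr rest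

lemma pvTreat?_excl (p t : String) (h : pvTreat? (PySem.Str.lower p) = some t) :
    PySem.Chars.startswith (PySem.Chars.lower p.toList) ['b','l','o','c','k'] = false ∧
    PySem.Chars.endswith (PySem.Chars.lower p.toList) ['s','a','m','p','l','i','n','g'] = false := by
  have hL : PySem.Chars.lower p.toList = (PySem.Str.lower p).toList := (PySem.Str.toList_lower p).symm
  unfold pvTreat? at h
  split_ifs at h with h1 h2 h3 h4 h5
  · rw [hL, h1]; decide
  · rw [hL, h2]; decide
  · rw [hL, h3]; decide
  · rw [hL, h4]; decide
  · rw [hL, h5]; decide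

lemma pv_samp_len (p : String)
    (h : PySem.Chars.endswith (PySem.Chars.lower p.toList) ['s','a','m','p','l','i','n','g'] = true) :
    1 ≤ p.length := by
  have h' := (PySem.Chars.endswith_iff _ _).mp h
  have hle := h'.length_le
  simp [PySem.Chars.lower] at hle
  have : p.length = p.toList.length := by simp
  omega

lemma pvFindB_append (xs ys : List String) :
    pvFindB (xs ++ ys) = (pvFindB xs).or (pvFindB ys) := by
  induction xs with
  | nil => simp [pvFindB]
  | cons p rest ih =>
      simp only [List.cons_append, pvFindB]
      split <;> simp [ih]

lemma pvFindT_append (xs ys : List String) :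
    pvFindT (xs ++ ys) = (pvFindT xs).or (pvFindT ys) := by
  induction xs with
  | nil => simp [pvFindT]
  | cons p rest ih =>
      simp only [List.cons_append, pvFindT]
      split <;> simp [ih]

lemma pvFindTr_append (xs ys : List String) :
    pvFindTr (xs ++ ys) = (pvFindTr xs).or (pvFindTr ys) := by
  induction xs with
  | nil => simp [pvFindTr]
  | cons p rest ih =>
      simp only [List.cons_append, pvFindTr]
      split
      · exact ih
      · cases hT : pvTreat? (PySem.Str.lower p) <;> simp [ih]

lemma foldl_step_eq (parts : List String) (st : Option Int × Option String × Option String) :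
    parts.foldl pvStepA st =
      ((pvFindB parts.reverse).getD st.1,
       (pvFindTr parts.reverse).or st.2.1,
       (pvFindT parts.reverse).getD st.2.2) := by
  induction parts generalizing st with
  | nil => simp [pvFindB, pvFindT, pvFindTr]
  | cons p rest ih =>
      rw [List.foldl_cons, ih, List.reverse_cons, pvFindB_append, pvFindT_append, pvFindTr_append]
      by_cases hb : PySem.Chars.startswith (PySem.Chars.lower p.toList) ['b','l','o','c','k'] = true
      · cases pvFindB rest.reverse <;> cases pvFindT rest.reverse <;> cases pvFindTr rest.reverse <;>
          simp [pvStepA, pvFindB, pvFindT, pvFindTr, hb]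
      · by_cases hs : PySem.Chars.endswith (PySem.Chars.lower p.toList) ['s','a','m','p','l','i','n','g'] = true
        · have hlen : 1 ≤ p.length := pv_samp_len p hs
          cases pvFindB rest.reverse <;> cases pvFindT rest.reverse <;> cases pvFindTr rest.reverse <;>
            simp [pvStepA, pvFindB, pvFindT, pvFindTr, hb, hs, hlen]
        · cases hT : pvTreat? (PySem.Str.lower p) with
          | some t =>
              cases pvFindB rest.reverse <;> cases pvFindT rest.reverse <;> cases pvFindTr rest.reverse <;>
                simp [pvStepA, pvFindB, pvFindT, pvFindTr, hb, hs, hT]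
          | none =>
              cases pvFindB rest.reverse <;> cases pvFindT rest.reverse <;> cases pvFindTr rest.reverse <;>
                simp [pvStepA, pvFindB, pvFindT, pvFindTr, hb, hs, hT]

lemma pvFindBlock_eq (l : List String) : pvFindBlock l = (pvFindB l).getD none := by
  induction l with
  | nil => simp [pvFindBlock, pvFindB]
  | cons p rest ih =>
      simp only [pvFindBlock, pvFindB]
      split
      · split
        · next he => rw [he, Option.getD_some]; decide
        · rfl
      · exact ih

lemma pvFindTreat_eq (l : List String) : pvFindTreat l = pvFindTr l := by
  induction l with
  | nil => rfl
  | cons p rest ih =>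
      cases hT : pvTreat? (PySem.Str.lower p) with
      | some t =>
          have hx := pvTreat?_excl p t hT
          simp [pvFindTreat, pvFindTr, hT, hx.1, hx.2]
      | none =>
          simp [pvFindTreat, pvFindTr, hT, ih]

lemma pvFindTime_eq (l : List String) : pvFindTime l = (pvFindT l).getD none := by
  induction l with
  | nil => rfl
  | cons p rest ih =>
      by_cases hs : PySem.Chars.endswith (PySem.Chars.lower p.toList) ['s','a','m','p','l','i','n','g'] = true
      · have hlen : 1 ≤ p.length := pv_samp_len p hs
        by_cases hb : PySem.Chars.startswith (PySem.Chars.lower p.toList) ['b','l','o','c','k'] = true <;>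
          simp [pvFindTime, pvFindT, hs, hb, hlen, ih]
      · simp [pvFindTime, pvFindT, hs, ih]

-- ===== VERDICT (by name: the statement is the Claim_ definition above) =====
theorem parse_isolate_field_spec : Claim_equal_parse_isolate_field := by
  intro val _
  unfold Spec_parse_isolate_field parse_isolate_field parse_isolate_field_alt
  rw [foldl_step_eq]
  simp [pvFindBlock_eq, pvFindTreat_eq, pvFindTime_eq]
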